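-- pv_equiv track=rewrite | github.com/kyngskwk/solving-problems | other/2019 Kakao Internship/05. 징검다리 건너기.py | solution
-- ===== SOURCE A (Python) =====
-- def solution(stones, k):
--     my_min = 99999999999999999999999999999
--     start = 0
--     for idx in range(len(stones) - k + 1):
--         my_sum = (max(stones[idx:idx + k]) + min(stones[idx:idx + k]))
--         if my_sum < my_min:
--             my_min = my_sum
--             start = idx
--
--     my_max = max(stones[start:start + k])
--
--     return my_max
-- ===== SOURCE B (Python) =====
-- def solution(stones, k):
--     # O(n) amortized: min-max queue via two stacks with running max/min annotations.
--     n = len(stones)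
--     if k >= n:
--         return max(stones)
--     front = []  # pop side; entries (val, running_max, running_min), top at end
--     back = []   # push side
--     for i in range(k):
--         v = stones[i]
--         if back:
--             _, mx, mn = back[-1]
--             back.append((v, max(mx, v), min(mn, v)))
--         else:
--             back.append((v, v, v))
--     hi = back[-1][1]
--     lo = back[-1][2]
--     best_sum = hi + lo
--     best_max = hi
--     for i in range(k, n):
--         # remove the oldest element of the window
--         if not front:
--             while back:
--                 v, _, _ = back.pop()
--                 if front:
--                     _, mx, mn = front[-1]
--                     front.append((v, max(mx, v), min(mn, v)))
--                 else:
--                     front.append((v, v, v))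
--         front.pop()
--         # add stones[i]
--         v = stones[i]
--         if back:
--             _, mx, mn = back[-1]
--             back.append((v, max(mx, v), min(mn, v)))
--         else:
--             back.append((v, v, v))
--         # window max / min from the two stack tops
--         if front and back:
--             hi = max(front[-1][1], back[-1][1])
--             lo = min(front[-1][2], back[-1][2])
--         elif front:
--             hi, lo = front[-1][1], front[-1][2]
--         else:
--             hi, lo = back[-1][1], back[-1][2]
--         if hi + lo < best_sum:
--             best_sum = hi + lo
--             best_max = hi
--     return best_max
-- ===== Notes on version B (the rewrite author's own statement) =====
-- stated objective: faster
-- what changed: A rescans every length-k slice for max and min (O(n*k)); B maintains the sliding window in a min-max queue built from two stacks annotated with running max/min, so each element is pushed and popped once (O(n) amortized), with the same first-minimal tie-breaking.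
import Mathlib
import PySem

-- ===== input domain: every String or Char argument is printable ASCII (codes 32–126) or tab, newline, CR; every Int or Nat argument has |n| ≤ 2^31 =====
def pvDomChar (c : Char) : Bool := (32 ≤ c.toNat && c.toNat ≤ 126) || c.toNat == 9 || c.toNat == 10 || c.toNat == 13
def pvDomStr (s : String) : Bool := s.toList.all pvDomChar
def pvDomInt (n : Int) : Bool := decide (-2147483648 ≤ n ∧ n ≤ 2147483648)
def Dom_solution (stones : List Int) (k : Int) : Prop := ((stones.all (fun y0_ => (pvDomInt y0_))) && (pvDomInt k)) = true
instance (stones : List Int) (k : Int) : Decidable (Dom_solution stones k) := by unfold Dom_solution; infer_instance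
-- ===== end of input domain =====

-- B replaces A's per-window max/min rescans (O(n·k)) by a min-max queue built from two
-- annotated stacks, O(n) amortized; same first-minimal tie-breaking, same result.

-- ===== PORT A =====
def solution (stones : List Int) (k : Int) : Int :=
  -- my_min = 99999…; start = 0; for idx in range(len(stones)-k+1): …
  let st := (PySem.List.pyRange 0 (PySem.List.len stones - k + 1)).foldl
    (fun (acc : Int × Int) idx =>
      let w := PySem.List.slice stones (some idx) (some (idx + k))
      let mySum := ((PySem.List.max? w (fun x => x)).getD 0) + ((PySem.List.min? w (fun x => x)).getD 0)
      if mySum < acc.1 then (mySum, idx) else acc)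
    ((99999999999999999999999999999 : Int), (0 : Int))
  -- my_max = max(stones[start:start+k])
  ((PySem.List.max? (PySem.List.slice stones (some st.2) (some (st.2 + k))) (fun x => x)).getD 0)

-- ===== PORT B =====
-- stack entry: (value, running max, running min); top of the Python list = head here
def pushTri (s : List (Int × Int × Int)) (v : Int) : List (Int × Int × Int) :=
  match s with
  | [] => [(v, v, v)]
  | (_, mx, mn) :: _ => (v, max mx v, min mn v) :: s

-- 'while back: v,_,_ = back.pop(); push v on front'
def pourTri (f : List (Int × Int × Int)) : List (Int × Int × Int) → List (Int × Int × Int)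
  | [] => f
  | (v, _, _) :: rest => pourTri (pushTri f v) rest

-- window max/min from the two stack tops
def statsTri (f b : List (Int × Int × Int)) : Int × Int :=
  match f, b with
  | (_, fmx, fmn) :: _, (_, bmx, bmn) :: _ => (max fmx bmx, min fmn bmn)
  | (_, fmx, fmn) :: _, [] => (fmx, fmn)
  | [], (_, bmx, bmn) :: _ => (bmx, bmn)
  | [], [] => (0, 0)   -- unreachable in Python (queue never empty there)

def solution_alt (stones : List Int) (k : Int) : Int :=
  let n : Int := PySem.List.len stones
  if k ≥ n then (PySem.List.max? stones (fun x => x)).getD 0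
  else
    -- for i in range(k): push stones[i] on back
    let back0 := (PySem.List.pyRange 0 k).foldl
      (fun b i => pushTri b (PySem.List.pyGetD stones i 0)) []
    let hi := (back0.headD (0, 0, 0)).2.1
    let lo := (back0.headD (0, 0, 0)).2.2
    -- for i in range(k, n): pop oldest, push stones[i], compare
    let st := (PySem.List.pyRange k n).foldl
      (fun (acc : Int × Int × List (Int × Int × Int) × List (Int × Int × Int)) i =>
        let (bestSum, bestMax, front, back) := acc
        let (front, back) := if front.isEmpty then (pourTri [] back, ([] : List (Int × Int × Int))) else (front, back)
        let front := front.tail                       -- front.pop()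
        let back := pushTri back (PySem.List.pyGetD stones i 0)
        let (hi, lo) := statsTri front back
        if hi + lo < bestSum then (hi + lo, hi, front, back) else (bestSum, bestMax, front, back))
      (hi + lo, hi, ([] : List (Int × Int × Int)), back0)
    st.2.1

-- ===== PRECONDITION & SPEC =====
-- A raises ValueError (max of an empty slice) exactly when stones is empty or k ≤ 0.
def Pre_solution (stones : List Int) (k : Int) : Prop := stones ≠ [] ∧ 1 ≤ k
instance (stones : List Int) (k : Int) : Decidable (Pre_solution stones k) := by unfold Pre_solution; infer_instance
def pvWitness_solution : List Int × Int := ([2, 4, 5, 3, 2, 1, 4, 2, 5, 1], 3)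

def Spec_solution (stones : List Int) (k : Int) (out : Int) : Prop := out = solution_alt stones k
instance (stones : List Int) (k : Int) (out : Int) : Decidable (Spec_solution stones k out) := by unfold Spec_solution; infer_instance

-- ===== CLAIM (what is proved, stated in full; the proofs are below) =====
def Claim_equal_solution : Prop := ∀ (stones : List Int) (k : Int), Dom_solution stones k → Pre_solution stones k → Spec_solution stones k (solution stones k)

-- ===== LEMMAS AND PROOFS =====

-- window t of width kn
def Wnd (stones : List Int) (kn t : Nat) : List Int := (stones.drop t).take kn

-- the maximum value of a nonempty list (0 on [] is never used)
def fmax : List Int → Int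
  | [] => 0
  | x :: t => t.foldl max x
def fmin : List Int → Int
  | [] => 0
  | x :: t => t.foldl min x

def isMax (c : List Int) (v : Int) : Prop := v ∈ c ∧ ∀ x ∈ c, x ≤ v
def isMin (c : List Int) (v : Int) : Prop := v ∈ c ∧ ∀ x ∈ c, v ≤ x

def vals (s : List (Int × Int × Int)) : List Int := s.map (fun e => e.1)

def goodS : List (Int × Int × Int) → Prop
  | [] => True
  | (v, mx, mn) :: r => goodS r ∧ isMax (v :: vals r) mx ∧ isMin (v :: vals r) mn

theorem fmax_isMax (c : List Int) (h : c ≠ []) : isMax c (fmax c) := by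
  match c with
  | x :: t =>
    refine ⟨?_, ?_⟩
    · rcases PySem.List.foldl_max_mem t x with h1 | h1
      · rw [fmax, h1]; exact List.mem_cons_self
      · exact List.mem_cons_of_mem _ h1
    · intro y hy
      rcases List.mem_cons.mp hy with rfl | hy
      · exact (PySem.List.le_foldl_max t y).1
      · exact (PySem.List.le_foldl_max t x).2 y hy

theorem fmin_isMin (c : List Int) (h : c ≠ []) : isMin c (fmin c) := by
  match c with
  | x :: t =>
    refine ⟨?_, ?_⟩
    · rcases PySem.List.foldl_min_mem t x with h1 | h1
      · rw [fmin, h1]; exact List.mem_cons_self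
      · exact List.mem_cons_of_mem _ h1
    · intro y hy
      rcases List.mem_cons.mp hy with rfl | hy
      · exact (PySem.List.foldl_min_le t y).1
      · exact (PySem.List.foldl_min_le t x).2 y hy

theorem isMax_unique {c : List Int} {v w : Int} (hv : isMax c v) (hw : isMax c w) : v = w := by
  exact le_antisymm (hw.2 v hv.1) (hv.2 w hw.1)

theorem isMin_unique {c : List Int} {v w : Int} (hv : isMin c v) (hw : isMin c w) : v = w := by
  exact le_antisymm (hv.2 w hw.1) (hw.2 v hv.1)

theorem isMax_congr {c c' : List Int} {v : Int} (hm : ∀ x, x ∈ c ↔ x ∈ c') (h : isMax c v) : isMax c' v := by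
  exact ⟨(hm v).1 h.1, fun x hx => h.2 x ((hm x).2 hx)⟩

theorem isMin_congr {c c' : List Int} {v : Int} (hm : ∀ x, x ∈ c ↔ x ∈ c') (h : isMin c v) : isMin c' v := by
  exact ⟨(hm v).1 h.1, fun x hx => h.2 x ((hm x).2 hx)⟩

theorem maxgetD (c : List Int) (h : c ≠ []) : (PySem.List.max? c (fun x => x)).getD 0 = fmax c := by
  match c with
  | x :: t => rw [PySem.List.max?_id_cons]; rfl

theorem mingetD (c : List Int) (h : c ≠ []) : (PySem.List.min? c (fun x => x)).getD 0 = fmin c := by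
  match c with
  | x :: t => rw [PySem.List.min?_id_cons]; rfl

theorem isMax_push {c : List Int} {m : Int} (h : isMax c m) (v : Int) : isMax (v :: c) (max m v) := by
  constructor
  · rcases le_total m v with hv | hv
    · rw [max_eq_right hv]; exact List.mem_cons_self
    · rw [max_eq_left hv]; exact List.mem_cons_of_mem _ h.1
  · intro x hx
    rcases List.mem_cons.mp hx with rfl | hx
    · exact le_max_right _ _
    · exact le_trans (h.2 x hx) (le_max_left _ _)

theorem isMin_push {c : List Int} {m : Int} (h : isMin c m) (v : Int) : isMin (v :: c) (min m v) := by
  constructor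
  · rcases le_total m v with hv | hv
    · rw [min_eq_left hv]; exact List.mem_cons_of_mem _ h.1
    · rw [min_eq_right hv]; exact List.mem_cons_self
  · intro x hx
    rcases List.mem_cons.mp hx with rfl | hx
    · exact min_le_right _ _
    · exact le_trans (min_le_left _ _) (h.2 x hx)

theorem isMax_append {c1 c2 : List Int} {m1 m2 : Int} (h1 : isMax c1 m1) (h2 : isMax c2 m2) :
    isMax (c1 ++ c2) (max m1 m2) := by
  constructor
  · rcases le_total m1 m2 with hv | hv
    · rw [max_eq_right hv]; exact List.mem_append_right _ h2.1
    · rw [max_eq_left hv]; exact List.mem_append_left _ h1.1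
  · intro x hx
    rcases List.mem_append.mp hx with hx | hx
    · exact le_trans (h1.2 x hx) (le_max_left _ _)
    · exact le_trans (h2.2 x hx) (le_max_right _ _)

theorem isMin_append {c1 c2 : List Int} {m1 m2 : Int} (h1 : isMin c1 m1) (h2 : isMin c2 m2) :
    isMin (c1 ++ c2) (min m1 m2) := by
  constructor
  · rcases le_total m1 m2 with hv | hv
    · rw [min_eq_left hv]; exact List.mem_append_left _ h1.1
    · rw [min_eq_right hv]; exact List.mem_append_right _ h2.1
  · intro x hx
    rcases List.mem_append.mp hx with hx | hx
    · exact le_trans (min_le_left _ _) (h1.2 x hx)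
    · exact le_trans (min_le_right _ _) (h2.2 x hx)

theorem vals_pushTri (s : List (Int × Int × Int)) (v : Int) : vals (pushTri s v) = v :: vals s := by
  match s with
  | [] => rfl
  | (w, mx, mn) :: r => rfl

theorem goodS_pushTri {s : List (Int × Int × Int)} (h : goodS s) (v : Int) : goodS (pushTri s v) := by
  match s with
  | [] =>
    refine ⟨trivial, ⟨List.mem_cons_self, ?_⟩, ⟨List.mem_cons_self, ?_⟩⟩ <;>
      · intro x hx; rcases List.mem_cons.mp hx with rfl | hx
        · exact le_refl _
        · simp [vals] at hx
  | (w, mx, mn) :: r =>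
    obtain ⟨hgr, hmx, hmn⟩ := h
    exact ⟨⟨hgr, hmx, hmn⟩, isMax_push hmx v, isMin_push hmn v⟩

theorem vals_pourTri (b : List (Int × Int × Int)) (f : List (Int × Int × Int)) :
    vals (pourTri f b) = (vals b).reverse ++ vals f := by
  induction b generalizing f with
  | nil => simp [pourTri, vals]
  | cons e r ih =>
    obtain ⟨v, mx, mn⟩ := e
    rw [pourTri, ih, vals_pushTri]
    simp [vals]

theorem goodS_pourTri (b : List (Int × Int × Int)) {f : List (Int × Int × Int)} (h : goodS f) :
    goodS (pourTri f b) := by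
  induction b generalizing f with
  | nil => exact h
  | cons e r ih =>
    obtain ⟨v, mx, mn⟩ := e
    exact ih (goodS_pushTri h v)

theorem goodS_tail {s : List (Int × Int × Int)} (h : goodS s) : goodS s.tail := by
  match s with
  | [] => exact h
  | (v, mx, mn) :: r => exact h.1

theorem goodS_head {s : List (Int × Int × Int)} (h : goodS s) (hs : s ≠ []) (d : Int × Int × Int) :
    isMax (vals s) (s.headD d).2.1 ∧ isMin (vals s) (s.headD d).2.2 := by
  match s with
  | (v, mx, mn) :: r => exact ⟨h.2.1, h.2.2⟩

theorem statsTri_spec {f b : List (Int × Int × Int)} {c : List Int} (hf : goodS f) (hb : goodS b)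
    (hc : vals f ++ (vals b).reverse = c) (hne : c ≠ []) :
    statsTri f b = (fmax c, fmin c) := by
  have hmemrev : ∀ x, x ∈ vals b ↔ x ∈ (vals b).reverse := by intro x; simp
  match f, b with
  | [], [] =>
    exfalso; apply hne; rw [← hc]; simp [vals]
  | [], (v, bmx, bmn) :: r =>
    have hMx : isMax c bmx := isMax_congr (by intro x; rw [← hc]; simp [vals, or_comm]) hb.2.1
    have hMn : isMin c bmn := isMin_congr (by intro x; rw [← hc]; simp [vals, or_comm]) hb.2.2
    rw [statsTri, isMax_unique hMx (fmax_isMax c hne), isMin_unique hMn (fmin_isMin c hne)]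
  | (v, fmx, fmn) :: r, [] =>
    have hMx : isMax c fmx := isMax_congr (by intro x; rw [← hc]; simp [vals]) hf.2.1
    have hMn : isMin c fmn := isMin_congr (by intro x; rw [← hc]; simp [vals]) hf.2.2
    rw [statsTri, isMax_unique hMx (fmax_isMax c hne), isMin_unique hMn (fmin_isMin c hne)]
  | (v, fmx, fmn) :: r, (w, bmx, bmn) :: q =>
    have hMx : isMax c (max fmx bmx) := by
      refine isMax_congr (c := vals ((v, fmx, fmn) :: r) ++ (vals ((w, bmx, bmn) :: q)).reverse) (by rw [hc]; intro x; rfl) ?_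
      exact isMax_append hf.2.1 (isMax_congr (hmemrev) hb.2.1)
    have hMn : isMin c (min fmn bmn) := by
      refine isMin_congr (c := vals ((v, fmx, fmn) :: r) ++ (vals ((w, bmx, bmn) :: q)).reverse) (by rw [hc]; intro x; rfl) ?_
      exact isMin_append hf.2.2 (isMin_congr (hmemrev) hb.2.2)
    rw [statsTri, isMax_unique hMx (fmax_isMax c hne), isMin_unique hMn (fmin_isMin c hne)]

theorem stack_init (l : List Int) (s : List (Int × Int × Int)) (h : goodS s) :
    vals (l.foldl pushTri s) = l.reverse ++ vals s ∧ goodS (l.foldl pushTri s) := by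
  induction l generalizing s with
  | nil => exact ⟨by simp [vals], h⟩
  | cons x l ih =>
    obtain ⟨h1, h2⟩ := ih (pushTri s x) (goodS_pushTri h x)
    refine ⟨?_, h2⟩
    rw [List.foldl_cons, h1, vals_pushTri]
    simp

-- window evolution
theorem Wnd_cons (stones : List Int) (kn t : Nat) (hk : 1 ≤ kn) (ht : t < stones.length) :
    Wnd stones kn t = stones[t] :: ((stones.drop (t + 1)).take (kn - 1)) := by
  obtain ⟨m, rfl⟩ : ∃ m, kn = m + 1 := ⟨kn - 1, by omega⟩
  rw [Wnd, List.drop_eq_getElem_cons ht, List.take_succ_cons]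
  simp

theorem Wnd_step (stones : List Int) (kn t : Nat) (hk : 1 ≤ kn) (ht : t + kn < stones.length) :
    (Wnd stones kn t).tail ++ [stones[t + kn]] = Wnd stones kn (t + 1) := by
  obtain ⟨m, rfl⟩ : ∃ m, kn = m + 1 := ⟨kn - 1, by omega⟩
  rw [Wnd_cons stones (m + 1) t (by omega) (by omega), List.tail_cons, Wnd, List.take_add_one]
  have hlt : m < (stones.drop (t + 1)).length := by simp; omega
  rw [List.getElem?_eq_getElem hlt, List.getElem_drop]
  simp only [Option.toList_some, show t + 1 + m = t + (m + 1) from by omega,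
    Nat.add_sub_cancel]

theorem Wnd_ne_nil (stones : List Int) (kn t : Nat) (hk : 1 ≤ kn) (ht : t < stones.length) :
    Wnd stones kn t ≠ [] := by
  rw [Wnd_cons stones kn t hk ht]
  exact List.cons_ne_nil _ _

-- the B-loop body's queue transformation
theorem vals_tail (s : List (Int × Int × Int)) : vals s.tail = (vals s).tail := List.map_tail

theorem queue_step (stones : List Int) (kn t : Nat) (hk : 1 ≤ kn) (ht : t + kn < stones.length)
    {f b : List (Int × Int × Int)} (hf : goodS f) (hb : goodS b)
    (hc : vals f ++ (vals b).reverse = Wnd stones kn t) :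
    goodS ((if f.isEmpty then (pourTri [] b, ([] : List (Int × Int × Int))) else (f, b)).1.tail) ∧
    goodS (pushTri (if f.isEmpty then (pourTri [] b, ([] : List (Int × Int × Int))) else (f, b)).2 stones[t + kn]) ∧
    vals ((if f.isEmpty then (pourTri [] b, ([] : List (Int × Int × Int))) else (f, b)).1.tail) ++
      (vals (pushTri (if f.isEmpty then (pourTri [] b, ([] : List (Int × Int × Int))) else (f, b)).2 stones[t + kn])).reverse
      = Wnd stones kn (t + 1) ∧
    statsTri ((if f.isEmpty then (pourTri [] b, ([] : List (Int × Int × Int))) else (f, b)).1.tail)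
      (pushTri (if f.isEmpty then (pourTri [] b, ([] : List (Int × Int × Int))) else (f, b)).2 stones[t + kn])
      = (fmax (Wnd stones kn (t + 1)), fmin (Wnd stones kn (t + 1))) := by
  have hne1 : Wnd stones kn (t + 1) ≠ [] := Wnd_ne_nil stones kn (t + 1) hk (by omega)
  by_cases hfe : f = []
  · subst hfe
    simp only [List.isEmpty_nil, if_true]
    have hgF : goodS (pourTri [] b) := goodS_pourTri b trivial
    have hcF : vals (pourTri [] b) = Wnd stones kn t := by
      rw [vals_pourTri]
      simpa [vals] using hc
    have hg2 : goodS (pourTri [] b).tail := goodS_tail hgF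
    have hb2 : goodS (pushTri [] stones[t + kn]) := goodS_pushTri (s := []) (by simp [goodS]) _
    have hcc : vals (pourTri [] b).tail ++ (vals (pushTri ([] : List (Int × Int × Int)) stones[t + kn])).reverse
        = Wnd stones kn (t + 1) := by
      rw [vals_tail, hcF, vals_pushTri]
      simpa [vals] using Wnd_step stones kn t hk ht
    exact ⟨hg2, hb2, hcc, statsTri_spec hg2 hb2 hcc hne1⟩
  · have hfe' : f.isEmpty = false := by
      cases f with
      | nil => exact absurd rfl hfe
      | cons e r => rfl
    simp only [hfe', Bool.false_eq_true, if_false]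
    have hvf : vals f ≠ [] := by simpa [vals] using hfe
    have hg2 : goodS f.tail := goodS_tail hf
    have hb2 : goodS (pushTri b stones[t + kn]) := goodS_pushTri hb _
    have hcc : vals f.tail ++ (vals (pushTri b stones[t + kn])).reverse = Wnd stones kn (t + 1) := by
      rw [vals_tail, vals_pushTri, List.reverse_cons, ← List.append_assoc,
        ← List.tail_append_of_ne_nil hvf, hc]
      exact Wnd_step stones kn t hk ht
    exact ⟨hg2, hb2, hcc, statsTri_spec hg2 hb2 hcc hne1⟩

-- the main aligned loop
-- proof-only copies of the two loop bodies (definitionally equal to the ports' lambdas)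
def stepA (stones : List Int) (k : Int) (acc : Int × Int) (idx : Int) : Int × Int :=
  let w := PySem.List.slice stones (some idx) (some (idx + k))
  let mySum := ((PySem.List.max? w (fun x => x)).getD 0) + ((PySem.List.min? w (fun x => x)).getD 0)
  if mySum < acc.1 then (mySum, idx) else acc

def stepB (stones : List Int)
    (acc : Int × Int × List (Int × Int × Int) × List (Int × Int × Int)) (i : Int) :
    Int × Int × List (Int × Int × Int) × List (Int × Int × Int) :=
  let (bestSum, bestMax, front, back) := acc
  let (front, back) := if front.isEmpty then (pourTri [] back, ([] : List (Int × Int × Int))) else (front, back)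
  let front := front.tail
  let back := pushTri back (PySem.List.pyGetD stones i 0)
  let (hi, lo) := statsTri front back
  if hi + lo < bestSum then (hi + lo, hi, front, back) else (bestSum, bestMax, front, back)

theorem stepB_eval (stones : List Int) (a1 a2 : Int) (a3 a4 : List (Int × Int × Int)) (i : Int) :
    stepB stones (a1, a2, a3, a4) i =
      (if (statsTri (if a3.isEmpty then (pourTri [] a4, ([] : List (Int × Int × Int))) else (a3, a4)).1.tail
            (pushTri (if a3.isEmpty then (pourTri [] a4, ([] : List (Int × Int × Int))) else (a3, a4)).2 (PySem.List.pyGetD stones i 0))).1 +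
          (statsTri (if a3.isEmpty then (pourTri [] a4, ([] : List (Int × Int × Int))) else (a3, a4)).1.tail
            (pushTri (if a3.isEmpty then (pourTri [] a4, ([] : List (Int × Int × Int))) else (a3, a4)).2 (PySem.List.pyGetD stones i 0))).2 < a1 then
        ((statsTri (if a3.isEmpty then (pourTri [] a4, ([] : List (Int × Int × Int))) else (a3, a4)).1.tail
            (pushTri (if a3.isEmpty then (pourTri [] a4, ([] : List (Int × Int × Int))) else (a3, a4)).2 (PySem.List.pyGetD stones i 0))).1 +
         (statsTri (if a3.isEmpty then (pourTri [] a4, ([] : List (Int × Int × Int))) else (a3, a4)).1.tail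
            (pushTri (if a3.isEmpty then (pourTri [] a4, ([] : List (Int × Int × Int))) else (a3, a4)).2 (PySem.List.pyGetD stones i 0))).2,
         (statsTri (if a3.isEmpty then (pourTri [] a4, ([] : List (Int × Int × Int))) else (a3, a4)).1.tail
            (pushTri (if a3.isEmpty then (pourTri [] a4, ([] : List (Int × Int × Int))) else (a3, a4)).2 (PySem.List.pyGetD stones i 0))).1,
         (if a3.isEmpty then (pourTri [] a4, ([] : List (Int × Int × Int))) else (a3, a4)).1.tail,
         pushTri (if a3.isEmpty then (pourTri [] a4, ([] : List (Int × Int × Int))) else (a3, a4)).2 (PySem.List.pyGetD stones i 0))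
      else
        (a1, a2,
         (if a3.isEmpty then (pourTri [] a4, ([] : List (Int × Int × Int))) else (a3, a4)).1.tail,
         pushTri (if a3.isEmpty then (pourTri [] a4, ([] : List (Int × Int × Int))) else (a3, a4)).2 (PySem.List.pyGetD stones i 0))) := rfl

theorem loop_eq (stones : List Int) (kn : Nat) (hk : 1 ≤ kn) (hkn : kn < stones.length) :
    ∀ (d t : Nat), t + d = stones.length - kn + 1 → 1 ≤ t →
    ∀ (ms : Int) (sidx : Nat), sidx + kn ≤ stones.length →
    ∀ (bm : Int) (f b : List (Int × Int × Int)), goodS f → goodS b →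
      vals f ++ (vals b).reverse = Wnd stones kn (t - 1) →
      bm = fmax (Wnd stones kn sidx) →
      ∃ s : Nat,
        ((PySem.List.pyRange (t : Int) ((stones.length : Int) - (kn : Int) + 1)).foldl
          (stepA stones (kn : Int)) (ms, ((sidx : Nat) : Int))).2 = (s : Int) ∧
        s + kn ≤ stones.length ∧
        ((PySem.List.pyRange ((kn + t - 1 : Nat) : Int) ((stones.length : Nat) : Int)).foldl
          (stepB stones) (ms, bm, f, b)).2.1 = fmax (Wnd stones kn s) := by
  intro d
  induction d with
  | zero =>
    intro t htd ht1 ms sidx hsidx bm f b hgf hgb hc hbm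
    rw [PySem.List.pyRange_one_eq_nil (by omega), PySem.List.pyRange_one_eq_nil (by omega)]
    exact ⟨sidx, rfl, hsidx, hbm⟩
  | succ d ih =>
    intro t htd ht1 ms sidx hsidx bm f b hgf hgb hc hbm
    have htle : t ≤ stones.length - kn := by omega
    have htlen : t < stones.length := by omega
    rw [PySem.List.pyRange_one_cons (a := (t : Int)) (by omega),
        PySem.List.pyRange_one_cons (a := ((kn + t - 1 : Nat) : Int)) (by omega),
        List.foldl_cons, List.foldl_cons]
    -- evaluate A's step at idx = t
    have hWne : Wnd stones kn t ≠ [] := Wnd_ne_nil stones kn t hk htlen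
    have hA : stepA stones (kn : Int) (ms, ((sidx : Nat) : Int)) ((t : Nat) : Int) =
        (if fmax (Wnd stones kn t) + fmin (Wnd stones kn t) < ms
         then (fmax (Wnd stones kn t) + fmin (Wnd stones kn t), ((t : Nat) : Int))
         else (ms, ((sidx : Nat) : Int))) := by
      unfold stepA
      dsimp only
      rw [PySem.List.slice_natCast_add stones t kn,
          show List.take kn (List.drop t stones) = Wnd stones kn t from rfl,
          maxgetD _ hWne, mingetD _ hWne]
    -- evaluate B's step at i = kn + t - 1
    have hprev : (t - 1) + kn < stones.length := by omega
    have hgetD : PySem.List.pyGetD stones ((kn + t - 1 : Nat) : Int) 0 = stones[(t - 1) + kn] := by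
      rw [PySem.List.pyGetD_natCast, List.getD_eq_getElem stones 0 (by omega)]
      exact getElem_congr_idx (by omega)
    obtain ⟨hg2, hb2, hcc, hst⟩ := queue_step stones kn (t - 1) hk hprev hgf hgb hc
    have hT : t - 1 + 1 = t := by omega
    rw [hT] at hcc hst
    have hB : stepB stones (ms, bm, f, b) ((kn + t - 1 : Nat) : Int) =
        (if fmax (Wnd stones kn t) + fmin (Wnd stones kn t) < ms
         then (fmax (Wnd stones kn t) + fmin (Wnd stones kn t), fmax (Wnd stones kn t),
               (if f.isEmpty then (pourTri [] b, ([] : List (Int × Int × Int))) else (f, b)).1.tail,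
               pushTri (if f.isEmpty then (pourTri [] b, ([] : List (Int × Int × Int))) else (f, b)).2 stones[(t - 1) + kn])
         else (ms, bm,
               (if f.isEmpty then (pourTri [] b, ([] : List (Int × Int × Int))) else (f, b)).1.tail,
               pushTri (if f.isEmpty then (pourTri [] b, ([] : List (Int × Int × Int))) else (f, b)).2 stones[(t - 1) + kn])) := by
      rw [stepB_eval, hgetD, hst]
    rw [hA, hB]
    have hAstart : ((t : Nat) : Int) + 1 = (((t + 1 : Nat)) : Int) := by omega
    have hBstart : ((kn + t - 1 : Nat) : Int) + 1 = ((kn + (t + 1) - 1 : Nat) : Int) := by omega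
    rw [hAstart, hBstart]
    have hccT : vals ((if f.isEmpty then (pourTri [] b, ([] : List (Int × Int × Int))) else (f, b)).1.tail) ++
        (vals (pushTri (if f.isEmpty then (pourTri [] b, ([] : List (Int × Int × Int))) else (f, b)).2 stones[(t - 1) + kn])).reverse
        = Wnd stones kn ((t + 1) - 1) := by
      simpa using hcc
    by_cases hlt : fmax (Wnd stones kn t) + fmin (Wnd stones kn t) < ms
    · rw [if_pos hlt, if_pos hlt]
      exact ih (t + 1) (by omega) (by omega) _ t (by omega) _ _ _ hg2 hb2 hccT rfl
    · rw [if_neg hlt, if_neg hlt]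
      exact ih (t + 1) (by omega) (by omega) _ sidx hsidx _ _ _ hg2 hb2 hccT hbm

theorem map_pyGetD_take (stones : List Int) (kn : Nat) (h : kn ≤ stones.length) :
    (PySem.List.pyRange 0 ((kn : Nat) : Int)).map (fun i => PySem.List.pyGetD stones i 0) = stones.take kn := by
  induction kn with
  | zero => rw [PySem.List.pyRange_one_eq_nil (by omega)]; rfl
  | succ m ihm =>
    have hcast : (((m + 1 : Nat)) : Int) = ((m : Nat) : Int) + 1 := by omega
    rw [hcast, PySem.List.pyRange_one_succ_right (by omega), List.map_append, ihm (by omega),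
        List.take_add_one, List.getElem?_eq_getElem (by omega)]
    simp only [List.map_cons, List.map_nil, Option.toList_some]
    rw [PySem.List.pyGetD_natCast, List.getD_eq_getElem stones 0 (by omega)]

-- ===== VERDICT (by name: the statement is the Claim_ definition above) =====
theorem solution_spec : Claim_equal_solution := by
  intro stones k hdom hpre
  obtain ⟨hne, hk1⟩ := hpre
  unfold Spec_solution
  obtain ⟨kn, rfl⟩ : ∃ m : Nat, k = (m : Int) := ⟨k.toNat, (Int.toNat_of_nonneg (by omega)).symm⟩
  have hkn1 : 1 ≤ kn := by exact_mod_cast hk1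
  have hlen0 : 0 < stones.length := List.length_pos_iff.mpr hne
  have hA : solution stones ((kn : Nat) : Int) =
      ((PySem.List.max? (PySem.List.slice stones
          (some (((PySem.List.pyRange 0 (PySem.List.len stones - ((kn : Nat) : Int) + 1)).foldl
            (stepA stones ((kn : Nat) : Int)) (99999999999999999999999999999, 0)).2))
          (some (((PySem.List.pyRange 0 (PySem.List.len stones - ((kn : Nat) : Int) + 1)).foldl
            (stepA stones ((kn : Nat) : Int)) (99999999999999999999999999999, 0)).2 + ((kn : Nat) : Int))))
        (fun x => x)).getD 0) := rfl
  have hB : solution_alt stones ((kn : Nat) : Int) =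
      (if ((kn : Nat) : Int) ≥ PySem.List.len stones then (PySem.List.max? stones (fun x => x)).getD 0
       else
        ((PySem.List.pyRange ((kn : Nat) : Int) (PySem.List.len stones)).foldl (stepB stones)
          ((((PySem.List.pyRange 0 ((kn : Nat) : Int)).foldl (fun b i => pushTri b (PySem.List.pyGetD stones i 0)) []).headD (0, 0, 0)).2.1 +
             (((PySem.List.pyRange 0 ((kn : Nat) : Int)).foldl (fun b i => pushTri b (PySem.List.pyGetD stones i 0)) []).headD (0, 0, 0)).2.2,
           (((PySem.List.pyRange 0 ((kn : Nat) : Int)).foldl (fun b i => pushTri b (PySem.List.pyGetD stones i 0)) []).headD (0, 0, 0)).2.1,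
           [],
           (PySem.List.pyRange 0 ((kn : Nat) : Int)).foldl (fun b i => pushTri b (PySem.List.pyGetD stones i 0)) [])).2.1) := rfl
  rw [hA, hB]
  simp only [PySem.List.len_eq]
  by_cases hbig : ((kn : Nat) : Int) ≥ ((stones.length : Nat) : Int)
  · -- k ≥ n : both sides are max(stones)
    rw [if_pos hbig]
    have hres : ((PySem.List.pyRange 0 (((stones.length : Nat) : Int) - ((kn : Nat) : Int) + 1)).foldl
        (stepA stones ((kn : Nat) : Int)) (99999999999999999999999999999, 0)).2 = 0 := by
      by_cases heq : stones.length = kn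
      · rw [show ((stones.length : Nat) : Int) - ((kn : Nat) : Int) + 1 = 0 + 1 from by omega,
            PySem.List.pyRange_one_singleton, List.foldl_cons, List.foldl_nil]
        unfold stepA; dsimp only; split <;> rfl
      · rw [PySem.List.pyRange_one_eq_nil (by omega)]; rfl
    rw [hres]
    have h1 : PySem.List.slice stones (some (0 : Int)) (some ((0 : Int) + ((kn : Nat) : Int))) = List.take kn stones := by
      have h2 := PySem.List.slice_natCast_add stones 0 kn
      simp only [Nat.cast_zero, List.drop_zero] at h2
      exact h2
    rw [h1, List.take_of_length_le (by omega)]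
  · rw [if_neg hbig]
    have hlt : kn < stones.length := by omega
    -- initial stack
    have hback : (PySem.List.pyRange 0 ((kn : Nat) : Int)).foldl
        (fun b i => pushTri b (PySem.List.pyGetD stones i 0)) ([] : List (Int × Int × Int))
        = (stones.take kn).foldl pushTri [] := by
      rw [← map_pyGetD_take stones kn (by omega), List.foldl_map]
    obtain ⟨hvals, hgood⟩ := stack_init (stones.take kn) [] (by simp [goodS])
    have hv : vals ((stones.take kn).foldl pushTri []) = (stones.take kn).reverse := by
      simpa [vals] using hvals
    have htakene : stones.take kn ≠ [] := by
      intro hx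
      rcases List.take_eq_nil_iff.mp hx with h | h
      · omega
      · exact hne h
    have hB0ne : (stones.take kn).foldl pushTri [] ≠ [] := by
      intro hx
      apply htakene
      have := hv
      rw [hx] at this
      simpa [vals] using (List.reverse_eq_nil_iff.mp this.symm).symm
    have hheads := goodS_head hgood hB0ne (0, 0, 0)
    have hW0ne : Wnd stones kn 0 ≠ [] := Wnd_ne_nil stones kn 0 hkn1 (by omega)
    have hmemW : ∀ x, x ∈ vals ((stones.take kn).foldl pushTri []) ↔ x ∈ Wnd stones kn 0 := by
      intro x; rw [hv]; simp [Wnd]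
    have hhi : (((stones.take kn).foldl pushTri []).headD (0, 0, 0)).2.1 = fmax (Wnd stones kn 0) :=
      isMax_unique (isMax_congr hmemW hheads.1) (fmax_isMax _ hW0ne)
    have hlo : (((stones.take kn).foldl pushTri []).headD (0, 0, 0)).2.2 = fmin (Wnd stones kn 0) :=
      isMin_unique (isMin_congr hmemW hheads.2) (fmin_isMin _ hW0ne)
    -- bounds from Dom for the sentinel comparison
    have hbound : ∀ x ∈ stones, -2147483648 ≤ x ∧ x ≤ 2147483648 := by
      intro x hx
      unfold Dom_solution at hdom
      simp only [Bool.and_eq_true, List.all_eq_true] at hdom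
      have := hdom.1 x hx
      simpa [pvDomInt] using this
    have hmax0 : fmax (Wnd stones kn 0) ∈ stones := by
      have h1 : fmax (Wnd stones kn 0) ∈ stones.take kn := by
        simpa [Wnd] using (fmax_isMax _ hW0ne).1
      exact List.mem_of_mem_take h1
    have hmin0 : fmin (Wnd stones kn 0) ∈ stones := by
      have h1 : fmin (Wnd stones kn 0) ∈ stones.take kn := by
        simpa [Wnd] using (fmin_isMin _ hW0ne).1
      exact List.mem_of_mem_take h1
    have hS0 : fmax (Wnd stones kn 0) + fmin (Wnd stones kn 0) < 99999999999999999999999999999 := by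
      obtain ⟨h1, h2⟩ := hbound _ hmax0
      obtain ⟨h3, h4⟩ := hbound _ hmin0
      omega
    -- peel A's first iteration (idx = 0)
    rw [PySem.List.pyRange_one_cons (a := (0 : Int)) (by omega), List.foldl_cons]
    have hstep0 : stepA stones ((kn : Nat) : Int) (99999999999999999999999999999, 0) 0
        = (fmax (Wnd stones kn 0) + fmin (Wnd stones kn 0), 0) := by
      have h0 : stepA stones ((kn : Nat) : Int) (99999999999999999999999999999, ((0 : Nat) : Int)) ((0 : Nat) : Int)
          = (fmax (Wnd stones kn 0) + fmin (Wnd stones kn 0), ((0 : Nat) : Int)) := by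
        unfold stepA; dsimp only
        rw [PySem.List.slice_natCast_add stones 0 kn,
            show List.take kn (List.drop 0 stones) = Wnd stones kn 0 from by rw [List.drop_zero]; rfl,
            maxgetD _ hW0ne, mingetD _ hW0ne, if_pos (by simpa using hS0)]
      exact h0
    rw [hstep0, hback, hhi, hlo]
    -- the aligned main loop
    obtain ⟨sfin, hsA, hsbound, hsB⟩ := loop_eq stones kn hkn1 hlt (stones.length - kn) 1 (by omega)
      (by omega) (fmax (Wnd stones kn 0) + fmin (Wnd stones kn 0)) 0 (by omega)
      (fmax (Wnd stones kn 0)) [] ((stones.take kn).foldl pushTri [])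
      (by simp [goodS]) hgood (by rw [show vals ([] : List (Int × Int × Int)) ++ (vals (List.foldl pushTri [] (List.take kn stones))).reverse = (vals (List.foldl pushTri [] (List.take kn stones))).reverse from by simp [vals], hv]; simp [Wnd]) rfl
    rw [show (kn + 1 - 1 : Nat) = kn from by omega] at hsB
    simp only [Nat.cast_one, Nat.cast_zero] at hsA
    simp only [zero_add]
    rw [hsA, hsB]
    have hfinlt : sfin < stones.length := by omega
    have hWfne : Wnd stones kn sfin ≠ [] := Wnd_ne_nil stones kn sfin hkn1 hfinlt
    rw [PySem.List.slice_natCast_add stones sfin kn,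
        show List.take kn (List.drop sfin stones) = Wnd stones kn sfin from rfl,
        maxgetD _ hWfne]
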